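-- pv_equiv track=rewrite | github.com/1r0nw1ll/quantum-arithmetic-research | qa_alphageometry_ptolemy/qa_orbit_stratification_cert_v1/qa_orbit_stratification_cert_validate.py | _check_J_invariance
-- ===== SOURCE A (Python) =====
-- def qa_mod(x: int, m: int) -> int:
--     """A1-compliant: result in {1..m}, never 0."""
--     return ((x - 1) % m) + 1
--
-- def sigma(b: int, e: int, m: int) -> tuple[int, int]:
--     return e, qa_mod(b + e, m)
--
-- def mu(b: int, e: int) -> tuple[int, int]:
--     return e, b
--
-- def v_p(n: int, p: int) -> int:
--     if n == 0:
--         return 10**9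
--     v, x = 0, n
--     while x % p == 0:
--         x //= p
--         v += 1
--     return v
--
-- def J(b: int, e: int, p: int) -> int:
--     return min(v_p(b, p), v_p(e, p))
--
-- def prime_power_factor(m: int) -> list[tuple[int, int]]:
--     out = []
--     n = m
--     d = 2
--     while d * d <= n:
--         if n % d == 0:
--             k = 0
--             while n % d == 0:
--                 n //= d
--                 k += 1
--             out.append((d, k))
--         d += 1
--     if n > 1:
--         out.append((n, 1))
--     return out
--
-- def _check_J_invariance(m: int) -> list[str]:
--     factors = prime_power_factor(m)
--     errs = []
--     for b in range(1, m + 1):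
--         for e in range(1, m + 1):
--             nb_s, ne_s = sigma(b, e, m)
--             nb_m, ne_m = mu(b, e)
--             for (p, _k) in factors:
--                 if J(nb_s, ne_s, p) != J(b, e, p):
--                     errs.append(f"QOS_A: σ breaks J at ({b},{e}) on p={p}: J={J(b,e,p)}, J∘σ={J(nb_s,ne_s,p)}")
--                     return errs
--                 if J(nb_m, ne_m, p) != J(b, e, p):
--                     errs.append(f"QOS_A: μ breaks J at ({b},{e}) on p={p}")
--                     return errs
--     return errs
-- ===== SOURCE B (Python) =====
-- def _val(i: int, p: int) -> int:
--     c = 0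
--     while i % p == 0:
--         i //= p
--         c += 1
--     return c
--
-- def _prime_divisors(m: int) -> list[int]:
--     ps = []
--     n = m
--     d = 2
--     while d * d <= n:
--         if n % d == 0:
--             ps.append(d)
--             while n % d == 0:
--                 n //= d
--         d += 1
--     if n > 1:
--         ps.append(n)
--     return ps
--
-- def _check_J_invariance(m: int) -> list[str]:
--     # Precompute the p-adic valuation of every 1..m once, so the double loop does O(1) lookups.
--     tabs = [(p, [0] + [_val(i, p) for i in range(1, m + 1)]) for p in _prime_divisors(m)]
--     for b in range(1, m + 1):
--         for e in range(1, m + 1):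
--             s2 = (b + e - 1) % m + 1
--             for p, v in tabs:
--                 j_be = min(v[b], v[e])
--                 j_s = min(v[e], v[s2])
--                 # μ maps (b,e) to (e,b); min is symmetric, so the μ check can never fail.
--                 if j_s != j_be:
--                     return [f"QOS_A: σ breaks J at ({b},{e}) on p={p}: J={j_be}, J∘σ={j_s}"]
--     return []
-- ===== Notes on version B (the rewrite author's own statement) =====
-- stated objective: faster
-- what changed: B precomputes a table of p-adic valuations for all of 1..m once per prime divisor and does O(1) table lookups inside the double (b,e) loop instead of recomputing v_p by repeated division, and drops the mu check entirely since mu only swaps (b,e) and min is symmetric, so that check can never fire.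
import Mathlib
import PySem

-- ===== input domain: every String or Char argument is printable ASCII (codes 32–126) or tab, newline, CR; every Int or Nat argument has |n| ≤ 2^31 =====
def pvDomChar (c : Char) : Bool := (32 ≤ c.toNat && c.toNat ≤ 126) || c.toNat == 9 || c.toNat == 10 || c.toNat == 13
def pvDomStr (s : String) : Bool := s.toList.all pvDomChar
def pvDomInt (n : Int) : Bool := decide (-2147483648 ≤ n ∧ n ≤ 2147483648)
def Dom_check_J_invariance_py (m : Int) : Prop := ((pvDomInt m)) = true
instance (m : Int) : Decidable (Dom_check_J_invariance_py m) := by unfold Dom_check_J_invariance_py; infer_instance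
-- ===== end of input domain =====

-- B precomputes the p-adic valuation of every 1..m once per prime divisor and does O(1)
-- table lookups in the (b,e) double loop (and drops the μ check, which min-symmetry makes
-- unable to fire) instead of recomputing v_p by repeated division at every step.

-- ===== PORT A =====
def pvQaMod (x m : Int) : Int := PySem.Int.mod (x - 1) m + 1

def pvSigma (b e m : Int) : Int × Int := (e, pvQaMod (b + e) m)

def pvMu (b e : Int) : Int × Int := (e, b)

-- the 'while x % p == 0' loop of v_p; fuel |x| is enough on every call A makes (x ≥ 1, p ≥ 2)
def pvVpGo (p : Int) : Nat → Int → Int → Int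
  | 0, v, _ => v
  | fuel+1, v, x => if PySem.Int.mod x p = 0 then pvVpGo p fuel (v + 1) (PySem.Int.floordiv x p) else v

def pvVp (n p : Int) : Int := if n = 0 then 10 ^ 9 else pvVpGo p n.natAbs 0 n

def pvJ (b e p : Int) : Int := min (pvVp b p) (pvVp e p)

-- inner 'while n % d == 0' of prime_power_factor, carrying (n, k)
def pvDivOut : Nat → Int → Int → Int → Int × Int
  | 0, n, _, k => (n, k)
  | fuel+1, n, d, k => if PySem.Int.mod n d = 0 then pvDivOut fuel (PySem.Int.floordiv n d) d (k + 1) else (n, k)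

-- the 'while d * d <= n' loop; fuel |m|+2 is enough (d stops past √n ≤ |m|, n only shrinks)
def pvPpfGo : Nat → Int → Int → List (Int × Int) → List (Int × Int)
  | 0, n, _, out => if n > 1 then out ++ [(n, 1)] else out
  | fuel+1, n, d, out =>
    if d * d ≤ n then
      if PySem.Int.mod n d = 0 then
        let r := pvDivOut n.natAbs n d 0
        pvPpfGo fuel r.1 (d + 1) (out ++ [(d, r.2)])
      else pvPpfGo fuel n (d + 1) out
    else if n > 1 then out ++ [(n, 1)] else out

def pvPrimePowerFactor (m : Int) : List (Int × Int) := pvPpfGo (m.natAbs + 2) m 2 []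

def pvMsgSigma (b e p j js : Int) : String :=
  "QOS_A: σ breaks J at (" ++ PySem.Int.toStr b ++ "," ++ PySem.Int.toStr e ++ ") on p=" ++
    PySem.Int.toStr p ++ ": J=" ++ PySem.Int.toStr j ++ ", J∘σ=" ++ PySem.Int.toStr js

def pvMsgMu (b e p : Int) : String :=
  "QOS_A: μ breaks J at (" ++ PySem.Int.toStr b ++ "," ++ PySem.Int.toStr e ++ ") on p=" ++ PySem.Int.toStr p

-- 'for (p, _k) in factors' with the two early returns
def pvFactorLoopA (b e nbs nes nbm nem : Int) : List (Int × Int) → Option String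
  | [] => none
  | (p, _) :: rest =>
    if pvJ nbs nes p ≠ pvJ b e p then some (pvMsgSigma b e p (pvJ b e p) (pvJ nbs nes p))
    else if pvJ nbm nem p ≠ pvJ b e p then some (pvMsgMu b e p)
    else pvFactorLoopA b e nbs nes nbm nem rest

def pvELoopA (m b : Int) (factors : List (Int × Int)) : List Int → Option String
  | [] => none
  | e :: rest =>
    let s := pvSigma b e m
    let t := pvMu b e
    match pvFactorLoopA b e s.1 s.2 t.1 t.2 factors with
    | some msg => some msg
    | none => pvELoopA m b factors rest

def pvBLoopA (m : Int) (factors : List (Int × Int)) : List Int → Option String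
  | [] => none
  | b :: rest =>
    match pvELoopA m b factors (PySem.List.pyRange 1 (m + 1) 1) with
    | some msg => some msg
    | none => pvBLoopA m factors rest

def check_J_invariance_py (m : Int) : List String :=
  match pvBLoopA m (pvPrimePowerFactor m) (PySem.List.pyRange 1 (m + 1) 1) with
  | some msg => [msg]
  | none => []

-- ===== PORT B =====
-- B's _val: the same while loop, no zero test (only called on 1..m)
def pvValGo (p : Int) : Nat → Int → Int → Int
  | 0, c, _ => c
  | fuel+1, c, i => if PySem.Int.mod i p = 0 then pvValGo p fuel (c + 1) (PySem.Int.floordiv i p) else c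

def pvVal (i p : Int) : Int := pvValGo p i.natAbs 0 i

-- B's inner 'while n % d == 0' (keeps only n)
def pvStrip : Nat → Int → Int → Int
  | 0, n, _ => n
  | fuel+1, n, d => if PySem.Int.mod n d = 0 then pvStrip fuel (PySem.Int.floordiv n d) d else n

def pvPrimesGo : Nat → Int → Int → List Int → List Int
  | 0, n, _, ps => if n > 1 then ps ++ [n] else ps
  | fuel+1, n, d, ps =>
    if d * d ≤ n then
      if PySem.Int.mod n d = 0 then
        pvPrimesGo fuel (pvStrip n.natAbs n d) (d + 1) (ps ++ [d])
      else pvPrimesGo fuel n (d + 1) ps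
    else if n > 1 then ps ++ [n] else ps

def pvPrimeDivisors (m : Int) : List Int := pvPrimesGo (m.natAbs + 2) m 2 []

-- v = [0] + [_val(i, p) for i in range(1, m + 1)]
def pvTable (m p : Int) : List Int := 0 :: (PySem.List.pyRange 1 (m + 1) 1).map (fun i => pvVal i p)

-- v[i]; every index B uses is in range, so the default is never read
def pvLookup (v : List Int) (i : Int) : Int := PySem.List.pyGetD v i 0

def pvFactorLoopB (b e s2 : Int) : List (Int × List Int) → Option String
  | [] => none
  | (p, v) :: rest =>
    let jbe := min (pvLookup v b) (pvLookup v e)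
    let js := min (pvLookup v e) (pvLookup v s2)
    if js ≠ jbe then some (pvMsgSigma b e p jbe js)
    else pvFactorLoopB b e s2 rest

def pvELoopB (m b : Int) (tabs : List (Int × List Int)) : List Int → Option String
  | [] => none
  | e :: rest =>
    let s2 := PySem.Int.mod (b + e - 1) m + 1
    match pvFactorLoopB b e s2 tabs with
    | some msg => some msg
    | none => pvELoopB m b tabs rest

def pvBLoopB (m : Int) (tabs : List (Int × List Int)) : List Int → Option String
  | [] => none
  | b :: rest =>
    match pvELoopB m b tabs (PySem.List.pyRange 1 (m + 1) 1) with
    | some msg => some msg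
    | none => pvBLoopB m tabs rest

def check_J_invariance_py_alt (m : Int) : List String :=
  match pvBLoopB m ((pvPrimeDivisors m).map (fun p => (p, pvTable m p))) (PySem.List.pyRange 1 (m + 1) 1) with
  | some msg => [msg]
  | none => []

-- ===== PRECONDITION & SPEC =====
def Spec_check_J_invariance_py (m : Int) (out : List String) : Prop := out = check_J_invariance_py_alt m
instance (m : Int) (out : List String) : Decidable (Spec_check_J_invariance_py m out) := by unfold Spec_check_J_invariance_py; infer_instance

-- ===== CLAIM (what is proved, stated in full; the proofs are below) =====
def Claim_equal_check_J_invariance_py : Prop := ∀ (m : Int), Dom_check_J_invariance_py m → Spec_check_J_invariance_py m (check_J_invariance_py m)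

-- ===== LEMMAS AND PROOFS =====

lemma pvValGo_eq_pvVpGo (p : Int) : ∀ (f : Nat) (c x : Int), pvValGo p f c x = pvVpGo p f c x := by
  intro f
  induction f with
  | zero => intro c x; rfl
  | succ n ih =>
    intro c x
    simp only [pvValGo, pvVpGo]
    split_ifs with h
    · exact ih _ _
    · rfl

lemma pvVal_eq_pvVp (i p : Int) (hi : i ≠ 0) : pvVal i p = pvVp i p := by
  simp [pvVal, pvVp, hi, pvValGo_eq_pvVpGo]

lemma pvStrip_eq_divOut_fst : ∀ (f : Nat) (n d k : Int), pvStrip f n d = (pvDivOut f n d k).1 := by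
  intro f
  induction f with
  | zero => intro n d k; rfl
  | succ m ih =>
    intro n d k
    simp only [pvStrip, pvDivOut]
    split_ifs with h
    · exact ih _ _ _
    · rfl

lemma pvPrimesGo_eq : ∀ (f : Nat) (n d : Int) (fs : List (Int × Int)),
    pvPrimesGo f n d (fs.map Prod.fst) = (pvPpfGo f n d fs).map Prod.fst := by
  intro f
  induction f with
  | zero =>
    intro n d fs
    simp only [pvPrimesGo, pvPpfGo]
    split_ifs <;> simp
  | succ m ih =>
    intro n d fs
    simp only [pvPrimesGo, pvPpfGo]
    split_ifs with h1 h2 h3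
    · rw [pvStrip_eq_divOut_fst n.natAbs n d 0]
      have : (fs.map Prod.fst) ++ [d] = (fs ++ [(d, (pvDivOut n.natAbs n d 0).2)]).map Prod.fst := by simp
      rw [this, ih]
    · exact ih _ _ _
    · simp
    · simp

lemma pvPrimeDivisors_eq (m : Int) : pvPrimeDivisors m = (pvPrimePowerFactor m).map Prod.fst := by
  have := pvPrimesGo_eq (m.natAbs + 2) m 2 []
  simpa [pvPrimeDivisors, pvPrimePowerFactor] using this

lemma mem_range_bounds {m x : Int} (hx : x ∈ PySem.List.pyRange 1 (m + 1) 1) : 1 ≤ x ∧ x ≤ m := by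
  have := (PySem.List.mem_pyRange_one (a := 1) (b := m + 1) (x := x)).1 hx
  omega

lemma pvLookup_table (m p i : Int) (h1 : 1 ≤ i) (h2 : i ≤ m) :
    pvLookup (pvTable m p) i = pvVp i p := by
  have hdiv : (m + 1 - 1 + 1 - 1) / 1 = m := by omega
  have hrange : PySem.List.pyRange 1 (m + 1) 1
      = List.map (fun k : Nat => (1 : Int) + 1 * (k : Int)) (List.range m.toNat) := by
    rw [PySem.List.pyRange_of_pos 1 (m + 1) (by omega), if_pos (by omega), hdiv]
  rw [pvLookup, pvTable, hrange, PySem.List.pyGetD_of_nonneg _ _ (by omega)]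
  have hi : i.toNat = (i.toNat - 1) + 1 := by omega
  rw [hi, List.getD_cons_succ, List.map_map,
      PySem.List.getD_map_range _ _ _ _ (by omega : i.toNat - 1 < m.toNat)]
  simp only [Function.comp_apply]
  have hv : (1 : Int) + 1 * ((i.toNat - 1 : Nat) : Int) = i := by omega
  rw [hv, pvVal_eq_pvVp i p (by omega)]

lemma pvFactorLoop_eq (m b e : Int) (hm : 1 ≤ m) (hb1 : 1 ≤ b) (hb2 : b ≤ m)
    (he1 : 1 ≤ e) (he2 : e ≤ m) :
    ∀ (fs : List (Int × Int)),
      pvFactorLoopA b e e (pvQaMod (b + e) m) e b fs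
        = pvFactorLoopB b e (PySem.Int.mod (b + e - 1) m + 1) (fs.map (fun q => (q.1, pvTable m q.1))) := by
  have hs2a : pvQaMod (b + e) m = PySem.Int.mod (b + e - 1) m + 1 := rfl
  have hs1 : 1 ≤ PySem.Int.mod (b + e - 1) m + 1 := by
    have := PySem.Int.mod_nonneg (b + e - 1) (b := m) (by omega)
    omega
  have hs2 : PySem.Int.mod (b + e - 1) m + 1 ≤ m := by
    have := PySem.Int.mod_lt (b + e - 1) (b := m) (by omega)
    omega
  intro fs
  induction fs with
  | nil => rfl
  | cons q rest ih =>
    obtain ⟨p, k⟩ := q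
    simp only [pvFactorLoopA, pvFactorLoopB, List.map_cons]
    rw [pvLookup_table m p b hb1 hb2, pvLookup_table m p e he1 he2,
        pvLookup_table m p _ hs1 hs2]
    rw [hs2a] at ih ⊢
    simp only [pvJ]
    split_ifs with h1 h2
    · rfl
    · exact absurd (min_comm _ _) h2
    · exact ih

lemma pvELoop_eq (m b : Int) (hm : 1 ≤ m) (hb1 : 1 ≤ b) (hb2 : b ≤ m) (fs : List (Int × Int)) :
    ∀ (L : List Int), (∀ e ∈ L, 1 ≤ e ∧ e ≤ m) →
      pvELoopA m b fs L = pvELoopB m b (fs.map (fun q => (q.1, pvTable m q.1))) L := by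
  intro L
  induction L with
  | nil => intro _; rfl
  | cons e rest ih =>
    intro h
    obtain ⟨he1, he2⟩ := h e (by simp)
    simp only [pvELoopA, pvELoopB, pvSigma, pvMu]
    rw [← pvFactorLoop_eq m b e hm hb1 hb2 he1 he2 fs]
    cases pvFactorLoopA b e e (pvQaMod (b + e) m) e b fs with
    | some msg => rfl
    | none => exact ih (fun x hx => h x (by simp [hx]))

lemma pvBLoop_eq (m : Int) (hm : 1 ≤ m) (fs : List (Int × Int)) :
    ∀ (L : List Int), (∀ b ∈ L, 1 ≤ b ∧ b ≤ m) →
      pvBLoopA m fs L = pvBLoopB m (fs.map (fun q => (q.1, pvTable m q.1))) L := by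
  intro L
  induction L with
  | nil => intro _; rfl
  | cons b rest ih =>
    intro h
    obtain ⟨hb1, hb2⟩ := h b (by simp)
    simp only [pvBLoopA, pvBLoopB]
    rw [← pvELoop_eq m b hm hb1 hb2 fs (PySem.List.pyRange 1 (m + 1) 1)
          (fun e he => mem_range_bounds he)]
    cases pvELoopA m b fs (PySem.List.pyRange 1 (m + 1) 1) with
    | some msg => rfl
    | none => exact ih (fun x hx => h x (by simp [hx]))

lemma tabs_eq (m : Int) :
    (pvPrimeDivisors m).map (fun p => (p, pvTable m p))
      = (pvPrimePowerFactor m).map (fun q => (q.1, pvTable m q.1)) := by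
  rw [pvPrimeDivisors_eq]
  simp [List.map_map]

lemma range_nil_of_nonpos (m : Int) (hm : m < 1) : PySem.List.pyRange 1 (m + 1) 1 = [] := by
  rw [PySem.List.pyRange_of_pos 1 (m + 1) (by omega), if_neg (by omega)]
  simp

-- ===== VERDICT (by name: the statement is the Claim_ definition above) =====
theorem check_J_invariance_py_spec : Claim_equal_check_J_invariance_py := by
  intro m _
  unfold Spec_check_J_invariance_py check_J_invariance_py check_J_invariance_py_alt
  by_cases hm : 1 ≤ m
  · rw [tabs_eq, ← pvBLoop_eq m hm (pvPrimePowerFactor m) (PySem.List.pyRange 1 (m + 1) 1)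
        (fun b hb => mem_range_bounds hb)]
  · rw [range_nil_of_nonpos m (by omega)]
    rfl
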